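-- pv_equiv track=rewrite | github.com/nan-oliveira/ProjectEuler | problem0092.py | chain_destination
-- ===== SOURCE A (Python) =====
-- def sum_of_squares(n):
--     """Calcula a soma dos quadrados dos dígitos de um número."""
--     return sum(int(digit) ** 2 for digit in str(n))
--
-- def chain_destination(n, cache):
--     """Determina se um número termina em 1 ou 89, utilizando cache."""
--     seen = []
--     while n != 1 and n != 89:
--         if n in cache:
--             n = cache[n]
--             break
--         seen.append(n)
--         n = sum_of_squares(n)
--
--     result = n
--     for num in seen:
--         cache[num] = result
--
--     return result
-- ===== SOURCE B (Python) =====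
-- def sum_of_squares(n):
--     """Calcula a soma dos quadrados dos digitos de um numero."""
--     return sum(int(digit) ** 2 for digit in str(n))
--
-- def chain_destination(n, cache):
--     """Memoized recursion: 1/89 are terminal; otherwise look in the cache or
--     recurse on sum_of_squares(n), caching the result on the way back up."""
--     if n == 1 or n == 89:
--         return n
--     if n in cache:
--         return cache[n]
--     result = chain_destination(sum_of_squares(n), cache)
--     cache[n] = result
--     return result
-- ===== Notes on version B (the rewrite author's own statement) =====
-- stated objective: simpler
-- what changed: Replaces the explicit while-loop with a 'seen' list and a separate cache-backfill pass by a direct memoized recursion that caches each intermediate value as it unwinds.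
import Mathlib
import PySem

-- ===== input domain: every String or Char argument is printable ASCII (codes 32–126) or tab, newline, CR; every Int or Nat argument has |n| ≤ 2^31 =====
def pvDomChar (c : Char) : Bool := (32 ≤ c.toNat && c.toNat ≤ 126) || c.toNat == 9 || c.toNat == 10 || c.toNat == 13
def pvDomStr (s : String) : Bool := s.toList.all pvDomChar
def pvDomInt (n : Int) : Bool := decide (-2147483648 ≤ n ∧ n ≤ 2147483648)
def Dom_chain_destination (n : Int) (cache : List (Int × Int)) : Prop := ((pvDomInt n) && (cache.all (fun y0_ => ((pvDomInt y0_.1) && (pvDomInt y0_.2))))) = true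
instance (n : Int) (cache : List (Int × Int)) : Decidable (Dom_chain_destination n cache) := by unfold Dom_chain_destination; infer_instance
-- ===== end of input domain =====

-- B replaces A's while-loop + seen list + backfill pass by a direct memoized recursion
-- (objective: simpler).  A mutates `cache` in place; the equivalence proved here is about
-- the RETURN value only (B writes the same key/value pairs, possibly in another order).
-- Both ports use a fuel bound of 10^6, far above any chain length reachable inside
-- Pre_ ∩ Dom (one sum_of_squares step maps |n| ≤ 2^31 below 811, and every positive
-- chain reaches 1 or 89 quickly); fuel exhaustion is never reached on admitted inputs.

-- ===== PORT A =====
-- sum(int(digit) ** 2 for digit in str(n)); exact for n ≥ 0 (on a '-' sign int() raises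
-- ValueError; inside Pre_ sum_of_squares is only ever called on nonnegative arguments,
-- the `getD 0` default is never used there).
def sum_of_squares (n : Int) : Int :=
  ((PySem.Int.toChars n).map (fun c => ((PySem.Int.ofChars? [c]).getD 0) ^ 2)).sum

-- the while-loop of A: returns (final n, seen)
def chainLoopA : Nat → Int → PySem.Dict Int Int → List Int → (Int × List Int)
  | 0, n, _, seen => (n, seen)
  | fuel + 1, n, cache, seen =>
    if n ≠ 1 ∧ n ≠ 89 then
      match cache.get? n with
      | some v => (v, seen)
      | none => chainLoopA fuel (sum_of_squares n) cache (seen ++ [n])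
    else (n, seen)

def chain_destination (n : Int) (cache : List (Int × Int)) : Int :=
  let d := PySem.Dict.ofList cache
  let r := chainLoopA 1000000 n d []
  let result := r.1
  -- for num in seen: cache[num] = result   (mutation of the argument; return value unaffected)
  let _ := r.2.foldl (fun d num => d.insert num result) d
  result

-- ===== PORT B =====
-- memoized recursion of Source B; the cache write `cache[n] = result` happens only after the
-- recursive call returns, so no lookup made during the computation ever sees it and the
-- RETURN value equals this pure recursion over the unchanged cache.
def chainRecB : Nat → Int → PySem.Dict Int Int → Int
  | 0, n, _ => n
  | fuel + 1, n, cache =>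
    if n = 1 ∨ n = 89 then n
    else
      match cache.get? n with
      | some v => v
      | none => chainRecB fuel (sum_of_squares n) cache

def chain_destination_alt (n : Int) (cache : List (Int × Int)) : Int :=
  chainRecB 1000000 n (PySem.Dict.ofList cache)

-- ===== PRECONDITION & SPEC =====
-- Pre_ excludes n ≤ 0 when n is not a cache key (and not the terminal 1/89 — impossible
-- for n ≤ 0): there Python A raises ValueError (str(n) has a '-' sign) or, for n = 0,
-- loops forever; every n ≥ 1 and every cached n returns normally.
def Pre_chain_destination (n : Int) (cache : List (Int × Int)) : Prop :=
  1 ≤ n ∨ ((PySem.Dict.ofList cache).get? n).isSome = true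
instance (n : Int) (cache : List (Int × Int)) : Decidable (Pre_chain_destination n cache) := by
  unfold Pre_chain_destination; infer_instance
def pvWitness_chain_destination : Int × (List (Int × Int)) := (44, [(32, 89)])
def Spec_chain_destination (n : Int) (cache : List (Int × Int)) (out : Int) : Prop := out = chain_destination_alt n cache
instance (n : Int) (cache : List (Int × Int)) (out : Int) : Decidable (Spec_chain_destination n cache out) := by unfold Spec_chain_destination; infer_instance

-- ===== CLAIM (what is proved, stated in full; the proofs are below) =====
def Claim_equal_chain_destination : Prop := ∀ (n : Int) (cache : List (Int × Int)), Dom_chain_destination n cache → Pre_chain_destination n cache → Spec_chain_destination n cache (chain_destination n cache)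

-- ===== LEMMAS AND PROOFS =====

-- core agreement: the first component of A's loop equals B's recursion, for any fuel
theorem chainLoopA_fst_eq_chainRecB (fuel : Nat) :
    ∀ (n : Int) (d : PySem.Dict Int Int) (seen : List Int),
      (chainLoopA fuel n d seen).1 = chainRecB fuel n d := by
  induction fuel with
  | zero => intro n d seen; rfl
  | succ f ih =>
    intro n d seen
    by_cases h : n = 1 ∨ n = 89
    · simp [chainLoopA, chainRecB, h]
      rcases h with h | h <;> simp [h]
    · push_neg at h
      simp only [chainLoopA, chainRecB, if_pos h]
      rw [if_neg (by tauto)]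
      cases hg : d.get? n with
      | some v => simp
      | none => simpa using ih (sum_of_squares n) d (seen ++ [n])

-- ===== VERDICT (by name: the statement is the Claim_ definition above) =====
theorem chain_destination_spec : Claim_equal_chain_destination := by
  intro n cache _ _
  unfold Spec_chain_destination chain_destination chain_destination_alt
  exact chainLoopA_fst_eq_chainRecB _ _ _ _
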